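-- pv_equiv track=rewrite | github.com/SkySpaceF/2021_Fall_SE | IOT1.py | SplitTxtByBlank
-- ===== SOURCE A (Python) =====
-- def SplitTxtByBlank(file_content):
--     key_list=[]
--     for single_line in file_content:
--         single_word=single_line.split(' ')
--         single_word=list(filter(None,single_word))
--         for element in single_word:
--             if element!='':
--                 key_list.append(element)
--         #key_list.append(single_word)
--     return key_list
-- ===== SOURCE B (Python) =====
-- def SplitTxtByBlank(file_content):
--     # Character-level scanner: walk each line once, cutting words at ' ',
--     # instead of split + filter + inner loop.
--     words = []
--     for line in file_content:
--         cur = []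
--         for ch in line:
--             if ch == ' ':
--                 if cur:
--                     words.append(''.join(cur))
--                     cur = []
--             else:
--                 cur.append(ch)
--         if cur:
--             words.append(''.join(cur))
--     return words
-- ===== Notes on version B (the rewrite author's own statement) =====
-- stated objective: alternative
-- what changed: Replaces split(' ') + filter(None,...) + inner loop with a single character-level scanner that cuts words at spaces as it walks each line.
import Mathlib
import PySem

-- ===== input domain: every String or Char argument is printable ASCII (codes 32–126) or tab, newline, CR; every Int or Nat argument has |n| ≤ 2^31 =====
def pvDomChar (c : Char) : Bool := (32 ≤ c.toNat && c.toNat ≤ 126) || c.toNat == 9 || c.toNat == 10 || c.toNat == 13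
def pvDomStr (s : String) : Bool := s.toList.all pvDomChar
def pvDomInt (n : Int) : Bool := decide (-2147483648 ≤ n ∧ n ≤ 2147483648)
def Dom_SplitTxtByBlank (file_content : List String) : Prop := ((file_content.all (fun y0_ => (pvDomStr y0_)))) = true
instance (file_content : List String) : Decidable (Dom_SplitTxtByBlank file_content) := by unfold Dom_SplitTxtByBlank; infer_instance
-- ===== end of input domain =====

-- B replaces A's split(' ') + filter(None, ...) + inner append loop with a single
-- character-level scanner that cuts words at spaces (alternative decomposition, same cost).


-- ===== PORT A =====
-- key_list = []; for single_line: single_word = single_line.split(' ');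
-- single_word = list(filter(None, single_word)); for element: if element != '': append
def SplitTxtByBlank (file_content : List String) : List String :=
  file_content.foldl (fun key_list single_line =>
    let single_word := (PySem.Str.split? single_line " ").getD []   -- sep " " ≠ "", always some
    let single_word := single_word.filter (fun w => w != "")        -- filter(None, ...)
    single_word.foldl (fun kl element =>
      if element != "" then kl ++ [element] else kl) key_list) []

-- ===== PORT B =====
-- words = []; for line: cur = []; for ch: if ch == ' ': flush cur; else cur.append(ch); flush cur
def SplitTxtByBlank_alt (file_content : List String) : List String :=
  file_content.foldl (fun words line =>
    let st := line.toList.foldl (fun (p : List String × List Char) ch =>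
      if ch = ' ' then
        (if p.2 ≠ [] then (p.1 ++ [String.ofList p.2], ([] : List Char)) else p)
      else
        (p.1, p.2 ++ [ch])) (words, ([] : List Char))
    if st.2 ≠ [] then st.1 ++ [String.ofList st.2] else st.1) []

-- ===== PRECONDITION & SPEC =====
def Spec_SplitTxtByBlank (file_content : List String) (out : List String) : Prop := out = SplitTxtByBlank_alt file_content
instance (file_content : List String) (out : List String) : Decidable (Spec_SplitTxtByBlank file_content out) := by unfold Spec_SplitTxtByBlank; infer_instance

-- ===== CLAIM (what is proved, stated in full; the proofs are below) =====
def Claim_equal_SplitTxtByBlank : Prop := ∀ (file_content : List String), Dom_SplitTxtByBlank file_content → Spec_SplitTxtByBlank file_content (SplitTxtByBlank file_content)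

-- ===== LEMMAS AND PROOFS =====

-- A simple structural-recursion model of s.split(' ') on char lists.
def mySplit : List Char → List (List Char)
  | [] => [[]]
  | c :: rest =>
    if c = ' ' then [] :: mySplit rest
    else
      match mySplit rest with
      | t :: ts => (c :: t) :: ts
      | [] => [[c]]

def consHead (pre : List Char) : List (List Char) → List (List Char)
  | [] => [pre]
  | t :: ts => (pre ++ t) :: ts

lemma mySplit_ne_nil (cs : List Char) : mySplit cs ≠ [] := by
  cases cs with
  | nil => simp [mySplit]
  | cons c rest =>
    simp only [mySplit]
    split <;> [simp; skip]
    split <;> simp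

lemma go_spec (fuel : Nat) : ∀ (l cur : List Char) (acc : List (List Char)),
    l.length ≤ fuel →
    PySem.Chars.splitOn.go [' '] fuel l cur acc =
      acc.reverse ++ consHead cur.reverse (mySplit l) := by
  induction fuel with
  | zero =>
    intro l cur acc h
    have : l = [] := List.eq_nil_of_length_eq_zero (Nat.le_zero.mp h)
    subst this
    simp [PySem.Chars.splitOn.go, mySplit, consHead]
  | succ fuel ih =>
    intro l cur acc h
    cases l with
    | nil => simp [PySem.Chars.splitOn.go, mySplit, consHead]
    | cons c rest =>
      by_cases hc : c = ' '
      · subst hc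
        have hpre : [' '].isPrefixOf (' ' :: rest) = true := by simp [List.isPrefixOf]
        rw [show PySem.Chars.splitOn.go [' '] (fuel + 1) (' ' :: rest) cur acc =
              PySem.Chars.splitOn.go [' '] fuel (List.drop 1 (' ' :: rest)) [] (cur.reverse :: acc) by
          simp [PySem.Chars.splitOn.go, hpre]]
        rw [ih _ _ _ (by simpa using Nat.le_of_succ_le_succ h)]
        simp only [List.drop_one, List.tail_cons, List.reverse_cons, List.append_assoc,
          List.reverse_nil]
        simp [mySplit]
        cases hms : mySplit rest with
        | nil => exact absurd hms (mySplit_ne_nil rest)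
        | cons t ts => simp [consHead]
      · have hpre : [' '].isPrefixOf (c :: rest) = false := by
          simp only [List.isPrefixOf, Bool.and_eq_false_iff, beq_eq_false_iff_ne, ne_eq]
          exact Or.inl fun hh => hc hh.symm
        rw [show PySem.Chars.splitOn.go [' '] (fuel + 1) (c :: rest) cur acc =
              PySem.Chars.splitOn.go [' '] fuel rest (c :: cur) acc by
          simp [PySem.Chars.splitOn.go, hpre]]
        rw [ih _ _ _ (by simpa using Nat.le_of_succ_le_succ h)]
        simp only [List.reverse_cons]
        simp only [mySplit, if_neg hc]
        cases hms : mySplit rest with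
        | nil => exact absurd hms (mySplit_ne_nil rest)
        | cons t ts => simp [consHead]

lemma splitOn_space (cs : List Char) : PySem.Chars.splitOn cs [' '] = mySplit cs := by
  unfold PySem.Chars.splitOn
  rw [go_spec (cs.length + 1) cs [] [] (Nat.le_succ _)]
  cases hms : mySplit cs with
  | nil => exact absurd hms (mySplit_ne_nil cs)
  | cons t ts => simp [consHead]

lemma mySplit_nospace_append (pre l : List Char) (h : ∀ c ∈ pre, c ≠ ' ') :
    mySplit (pre ++ l) = consHead pre (mySplit l) := by
  induction pre with
  | nil =>
    cases hms : mySplit l with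
    | nil => exact absurd hms (mySplit_ne_nil l)
    | cons t ts => simp [consHead, hms]
  | cons a pre ih =>
    have ha : a ≠ ' ' := h a (by simp)
    simp only [List.cons_append, mySplit, if_neg ha,
      ih (fun c hc => h c (by simp [hc]))]
    cases hms : mySplit l with
    | nil => exact absurd hms (mySplit_ne_nil l)
    | cons t ts => simp [consHead]

-- words of a char list, as B produces them
def wordsC (cs : List Char) : List String :=
  ((mySplit cs).filter (fun t => !t.isEmpty)).map String.ofList

lemma wordsC_nospace (cur : List Char) (h : ∀ c ∈ cur, c ≠ ' ') :
    wordsC cur = if cur ≠ [] then [String.ofList cur] else [] := by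
  have : mySplit cur = [cur] := by
    have := mySplit_nospace_append cur [] h
    simpa [mySplit, consHead] using this
  unfold wordsC
  rw [this]
  cases cur <;> simp

lemma wordsC_nospace_space (cur rest : List Char) (h : ∀ c ∈ cur, c ≠ ' ') :
    wordsC (cur ++ ' ' :: rest) =
      (if cur ≠ [] then [String.ofList cur] else []) ++ wordsC rest := by
  have : mySplit (cur ++ ' ' :: rest) = cur :: mySplit rest := by
    rw [mySplit_nospace_append cur (' ' :: rest) h]
    cases hms : mySplit rest with
    | nil => exact absurd hms (mySplit_ne_nil rest)
    | cons t ts => simp [mySplit, consHead, hms]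
  unfold wordsC
  rw [this]
  cases cur <;> simp

-- B's inner scanner computes ws ++ wordsC (cur ++ cs)
lemma scan_spec (cs : List Char) : ∀ (ws : List String) (cur : List Char),
    (∀ c ∈ cur, c ≠ ' ') →
    (let st := cs.foldl (fun (p : List String × List Char) ch =>
        if ch = ' ' then
          (if p.2 ≠ [] then (p.1 ++ [String.ofList p.2], ([] : List Char)) else p)
        else
          (p.1, p.2 ++ [ch])) (ws, cur)
     if st.2 ≠ [] then st.1 ++ [String.ofList st.2] else st.1) =
      ws ++ wordsC (cur ++ cs) := by
  induction cs with
  | nil =>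
    intro ws cur h
    simp only [List.foldl_nil, List.append_nil]
    rw [wordsC_nospace cur h]
    split <;> simp_all
  | cons c rest ih =>
    intro ws cur h
    by_cases hc : c = ' '
    · subst hc
      simp only [List.foldl_cons, if_true]
      by_cases hcur : cur ≠ []
      · rw [if_pos hcur, ih (ws ++ [String.ofList cur]) [] (by simp),
            wordsC_nospace_space cur rest h]
        simp [hcur]
      · rw [if_neg hcur]
        have hnil : cur = [] := by simpa using hcur
        subst hnil
        rw [ih ws [] (by simp), wordsC_nospace_space [] rest (by simp)]
        simp
    · simp only [List.foldl_cons]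
      rw [if_neg hc]
      rw [ih ws (cur ++ [c]) (by intro x hx; rcases List.mem_append.mp hx with h1 | h1
                                 · exact h x h1
                                 · simp at h1; simpa [h1] using hc)]
      simp

-- A's per-line body also computes key_list ++ wordsC line
lemma filter_foldl_append (ws : List String) (kl : List String)
    (h : ∀ e ∈ ws, e ≠ "") :
    ws.foldl (fun kl element => if element != "" then kl ++ [element] else kl) kl = kl ++ ws := by
  induction ws generalizing kl with
  | nil => simp
  | cons w ws ih =>
    have hw : w ≠ "" := h w (by simp)
    simp only [List.foldl_cons]
    rw [if_pos (show (w != "") = true from by simpa using hw)]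
    rw [ih (kl ++ [w]) (fun e he => h e (by simp [he]))]
    simp

lemma string_ofList_empty_iff (t : List Char) : (String.ofList t = "") ↔ t = [] := by
  constructor
  · intro h
    have : (String.ofList t).toList = ("" : String).toList := by rw [h]
    simpa using this
  · intro h; simp [h]

lemma a_line (line : String) (kl : List String) :
    (let single_word := ((PySem.Str.split? line " ").getD []).filter (fun w => w != "")
     single_word.foldl (fun kl element => if element != "" then kl ++ [element] else kl) kl) =
      kl ++ wordsC line.toList := by
  have hsplit : PySem.Str.split? line " " =
      some ((mySplit line.toList).map String.ofList) := by
    have h1 := PySem.Str.split?_map line " "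
    have h2 : PySem.Chars.split? line.toList [' '] = some (mySplit line.toList) := by
      simp [PySem.Chars.split?, splitOn_space]
    rw [show (" " : String).toList = [' '] from rfl] at h1
    rw [h2] at h1
    cases hs : PySem.Str.split? line " " with
    | none => rw [hs] at h1; simp at h1
    | some parts =>
      rw [hs] at h1
      simp only [Option.map_some, Option.some.injEq] at h1
      congr 1
      calc parts = (parts.map String.toList).map String.ofList := by
              simp [List.map_map, Function.comp_def, String.ofList_toList]
        _ = (mySplit line.toList).map String.ofList := by rw [h1]
  simp only [hsplit, Option.getD_some]
  have hfe : ((mySplit line.toList).map String.ofList).filter (fun w => w != "") =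
      wordsC line.toList := by
    unfold wordsC
    rw [List.filter_map]
    congr 1
    apply List.filter_congr
    intro t _
    by_cases ht : t = []
    · simp [ht]
    · have hne : String.ofList t ≠ "" := fun hh => ht ((string_ofList_empty_iff t).mp hh)
      rw [List.isEmpty_eq_false_iff.mpr ht]
      simp [hne]
  rw [hfe]
  apply filter_foldl_append
  intro e he
  have : e ∈ wordsC line.toList := he
  unfold wordsC at this
  rcases List.mem_map.mp this with ⟨t, ht, rfl⟩
  have : t ≠ [] := by simpa using (List.mem_filter.mp ht).2
  simpa [string_ofList_empty_iff]

lemma both_eq (file_content : List String) : ∀ (init : List String),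
    file_content.foldl (fun key_list single_line =>
      let single_word := ((PySem.Str.split? single_line " ").getD []).filter (fun w => w != "")
      single_word.foldl (fun kl element =>
        if element != "" then kl ++ [element] else kl) key_list) init =
    file_content.foldl (fun words line =>
      let st := line.toList.foldl (fun (p : List String × List Char) ch =>
        if ch = ' ' then
          (if p.2 ≠ [] then (p.1 ++ [String.ofList p.2], ([] : List Char)) else p)
        else
          (p.1, p.2 ++ [ch])) (words, ([] : List Char))
      if st.2 ≠ [] then st.1 ++ [String.ofList st.2] else st.1) init := by
  induction file_content with
  | nil => intro init; rfl
  | cons line rest ih =>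
    intro init
    simp only [List.foldl_cons]
    rw [a_line line init, scan_spec line.toList init [] (by simp)]
    simp only [List.nil_append]
    exact ih (init ++ wordsC line.toList)

-- ===== VERDICT (by name: the statement is the Claim_ definition above) =====
theorem SplitTxtByBlank_spec : Claim_equal_SplitTxtByBlank := by
  intro file_content _
  unfold Spec_SplitTxtByBlank SplitTxtByBlank SplitTxtByBlank_alt
  exact both_eq file_content []
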